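-- pv_equiv track=rewrite | github.com/PLeszowski/BWD_CARIAD | mainLogic.py | get_gap_list
-- ===== SOURCE A (Python) =====
-- def get_gap_list(index_list, frames_to_debounce):
--     if frames_to_debounce > 0:
--         if index_list:
--             index_list.sort()
--             no_gap = 1
--             gap_index_list = []
--             gap_list = []
--             last_index = index_list[0]
--             for counter, index in enumerate(index_list):
--                 if counter == 0:
--                     gap_index_list.append(index)
--                     continue
--                 diff = index - last_index
--                 last_index = index
--                 if diff == 1:
--                     no_gap += 1
--                     gap_index_list.append(index)
--                 else:
--                     if no_gap < frames_to_debounce: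
--                         gap_list += gap_index_list
--                     gap_index_list.clear()
--                     gap_index_list.append(index)
--                     no_gap = 1
--             if no_gap < frames_to_debounce:
--                 gap_list += gap_index_list
--             return gap_list
--         else:
--             return []
--     else:
--         return []
-- ===== SOURCE B (Python) =====
-- def get_gap_list(index_list, frames_to_debounce):
--     if frames_to_debounce <= 0 or not index_list:
--         return []
--     index_list.sort()
--     # pass 1: label every element with a run id (a non-unit pairwise difference starts a new run)
--     labels = [0]
--     run_id = 0
--     for prev, v in zip(index_list, index_list[1:]):
--         if v - prev != 1:
--             run_id += 1
--         labels.append(run_id)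
--     # pass 2: run sizes, counted in a dict keyed by run id
--     counts = {}
--     for r in labels:
--         counts[r] = counts.get(r, 0) + 1
--     # pass 3: keep the elements whose run size is below the threshold
--     return [v for v, r in zip(index_list, labels) if counts[r] < frames_to_debounce]
-- ===== Notes on version B (the rewrite author's own statement) =====
-- stated objective: alternative
-- what changed: B replaces A's single streaming pass with a flush buffer and running no_gap counter by three staged passes: label each sorted element with a run id derived from pairwise differences, count run sizes in a dict, then filter elements whose run's count is below the threshold.
import Mathlib
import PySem

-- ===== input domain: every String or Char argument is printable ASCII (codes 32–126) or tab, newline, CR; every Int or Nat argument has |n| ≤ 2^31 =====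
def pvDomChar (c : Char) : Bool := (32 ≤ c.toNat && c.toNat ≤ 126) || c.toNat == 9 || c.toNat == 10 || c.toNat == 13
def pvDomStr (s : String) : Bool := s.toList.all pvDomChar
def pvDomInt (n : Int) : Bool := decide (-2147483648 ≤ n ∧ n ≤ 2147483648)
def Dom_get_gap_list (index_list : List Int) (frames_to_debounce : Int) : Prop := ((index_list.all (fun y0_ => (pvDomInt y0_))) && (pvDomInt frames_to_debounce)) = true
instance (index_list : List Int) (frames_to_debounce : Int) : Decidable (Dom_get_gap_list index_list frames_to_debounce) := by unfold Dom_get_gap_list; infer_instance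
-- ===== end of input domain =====

-- B replaces A's streaming flush-buffer pass by three staged passes (run-id labels from
-- pairwise differences, a count dict of run sizes, a filter by count); equivalence is about
-- the return value (both A and B sort index_list in place, the same side effect).

-- ===== PORT A =====
-- state = (no_gap, gap_index_list, gap_list, last_index)
def ggStepA (k : Int) (st : Int × List Int × List Int × Int) (civ : Int × Int) :
    Int × List Int × List Int × Int :=
  let no_gap := st.1; let gil := st.2.1; let gl := st.2.2.1; let last := st.2.2.2
  let counter := civ.1; let index := civ.2
  if counter = 0 then (no_gap, gil ++ [index], gl, last)
  else
    let diff := index - last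
    if diff = 1 then (no_gap + 1, gil ++ [index], gl, index)
    else (1, [index], (if no_gap < k then gl ++ gil else gl), index)

def get_gap_list (index_list : List Int) (frames_to_debounce : Int) : List Int :=
  if frames_to_debounce > 0 then
    if index_list ≠ [] then
      let s := PySem.List.sorted index_list (fun x => x) false
      let last_index := (PySem.List.pyGet? s 0).getD 0  -- s ≠ [] here, so the getD default is never used
      let st := (PySem.List.enumerate s 0).foldl (ggStepA frames_to_debounce) (1, [], [], last_index)
      if st.1 < frames_to_debounce then st.2.2.1 ++ st.2.1 else st.2.2.1
    else []
  else []

-- ===== PORT B =====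
-- pass 1 step: state = (labels, run_id), input = (prev, v)
def lblStep (st : List Int × Int) (pv : Int × Int) : List Int × Int :=
  if pv.2 - pv.1 ≠ 1 then (st.1 ++ [st.2 + 1], st.2 + 1) else (st.1 ++ [st.2], st.2)

def get_gap_list_alt (index_list : List Int) (frames_to_debounce : Int) : List Int :=
  if frames_to_debounce ≤ 0 ∨ index_list = [] then []
  else
    let s := PySem.List.sorted index_list (fun x => x) false
    let labels := ((s.zip (PySem.List.slice s (some 1) none)).foldl lblStep ([0], 0)).1
    let counts := labels.foldl (fun d r => d.insert r (d.getD r 0 + 1)) (PySem.Dict.empty : PySem.Dict Int Int)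
    (s.zip labels).foldl
      (fun acc vr => if counts.getD vr.2 0 < frames_to_debounce then acc ++ [vr.1] else acc) []

-- ===== PRECONDITION & SPEC =====
def Spec_get_gap_list (index_list : List Int) (frames_to_debounce : Int) (out : List Int) : Prop := out = get_gap_list_alt index_list frames_to_debounce
instance (index_list : List Int) (frames_to_debounce : Int) (out : List Int) : Decidable (Spec_get_gap_list index_list frames_to_debounce out) := by unfold Spec_get_gap_list; infer_instance

-- ===== CLAIM (what is proved, stated in full; the proofs are below) =====
def Claim_equal_get_gap_list : Prop := ∀ (index_list : List Int) (frames_to_debounce : Int), Dom_get_gap_list index_list frames_to_debounce → Spec_get_gap_list index_list frames_to_debounce (get_gap_list index_list frames_to_debounce)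

-- ===== LEMMAS AND PROOFS =====

/-- Length of the maximal consecutive chain continuing `x` into `xs`. -/
def chainLen (x : Int) : List Int → Nat
  | [] => 0
  | y :: ys => if y - x = 1 then chainLen y ys + 1 else 0

/-- The run-id labels B assigns to `xs`, continuing a run labelled `rid` whose last element is `x`. -/
def labsAux (rid x : Int) : List Int → List Int
  | [] => []
  | y :: ys => if y - x = 1 then rid :: labsAux rid y ys else (rid + 1) :: labsAux (rid + 1) y ys

/-- The final run_id after processing. -/
def finRid (rid x : Int) : List Int → Int
  | [] => rid
  | y :: ys => if y - x = 1 then finRid rid y ys else finRid (rid + 1) y ys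

/-- A's answer from `x :: xs` when `pre` is the already-collected part of x's run. -/
def gspec (k : Int) (pre : List Int) (x : Int) : List Int → List Int
  | [] => if (pre.length : Int) + 1 < k then pre ++ [x] else []
  | y :: ys =>
      if y - x = 1 then gspec k (pre ++ [x]) y ys
      else (if (pre.length : Int) + 1 < k then pre ++ [x] else []) ++ gspec k [] y ys

/-- The elements from `x :: xs` that belong to short runs, `pre` counting earlier run members. -/
def gtail (k pre x : Int) : List Int → List Int
  | [] => if pre + 1 < k then [x] else []
  | y :: ys =>
      (if pre + 1 + (chainLen x (y :: ys) : Int) < k then [x] else []) ++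
      (if y - x = 1 then gtail k (pre + 1) y ys else gtail k 0 y ys)

lemma ggA_main (k : Int) : ∀ (xs : List Int) (x : Int) (pre gl : List Int) (i : Int), 1 ≤ i →
    (let st := (PySem.List.enumerate xs i).foldl (ggStepA k)
        (((pre.length : Int) + 1, pre ++ [x], gl, x));
     if st.1 < k then st.2.2.1 ++ st.2.1 else st.2.2.1) = gl ++ gspec k pre x xs := by
  intro xs
  induction xs with
  | nil =>
    intro x pre gl i _
    simp only [PySem.List.enumerate_nil, List.foldl_nil, gspec]
    split_ifs <;> simp
  | cons y ys ih =>
    intro x pre gl i hi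
    rw [PySem.List.enumerate_cons]
    simp only [List.foldl_cons]
    by_cases h1 : y - x = 1
    · have hA : ggStepA k ((pre.length : Int) + 1, pre ++ [x], gl, x) (i, y)
          = (((pre ++ [x]).length : Int) + 1, (pre ++ [x]) ++ [y], gl, y) := by
        simp [ggStepA, h1, show ¬ (i = 0) by omega]
      rw [hA]
      have := ih y (pre ++ [x]) gl (i + 1) (by omega)
      simp only at this
      rw [this, show gspec k pre x (y :: ys) = gspec k (pre ++ [x]) y ys from by
        simp [gspec, h1]]
    · have hA : ggStepA k ((pre.length : Int) + 1, pre ++ [x], gl, x) (i, y)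
          = ((([] : List Int).length : Int) + 1, [] ++ [y],
             (if (pre.length : Int) + 1 < k then gl ++ (pre ++ [x]) else gl), y) := by
        simp [ggStepA, h1, show ¬ (i = 0) by omega]
      rw [hA]
      have := ih y [] (if (pre.length : Int) + 1 < k then gl ++ (pre ++ [x]) else gl) (i + 1) (by omega)
      simp only at this
      rw [this, show gspec k pre x (y :: ys)
          = (if (pre.length : Int) + 1 < k then pre ++ [x] else []) ++ gspec k [] y ys from by
        simp [gspec, h1]]
      split_ifs <;> simp
  
lemma gspec_eq_gtail (k : Int) : ∀ (xs : List Int) (x : Int) (pre : List Int),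
    gspec k pre x xs
      = (if (pre.length : Int) + 1 + (chainLen x xs : Int) < k then pre else []) ++
        gtail k (pre.length : Int) x xs := by
  intro xs
  induction xs with
  | nil =>
    intro x pre
    simp only [gspec, gtail, chainLen]
    split_ifs with h h2 h3 <;> simp_all <;> omega
  | cons y ys ih =>
    intro x pre
    by_cases h1 : y - x = 1
    · simp only [gspec, gtail, if_pos h1]
      rw [ih y (pre ++ [x])]
      have hc : (chainLen x (y :: ys) : Int) = (chainLen y ys : Int) + 1 := by
        simp [chainLen, h1]
      have hl : ((pre ++ [x]).length : Int) = (pre.length : Int) + 1 := by simp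
      rw [hl, hc]
      have hiff : (pre.length : Int) + 1 + 1 + (chainLen y ys : Int) < k ↔
          (pre.length : Int) + 1 + ((chainLen y ys : Int) + 1) < k := by omega
      split_ifs with h2 h3 h3 <;> simp_all <;> omega
    · simp only [gspec, gtail, if_neg h1]
      rw [ih y []]
      have hc : (chainLen x (y :: ys) : Int) = 0 := by simp [chainLen, h1]
      rw [hc]
      simp only [List.length_nil, Int.natCast_zero]
      split_ifs with h2 h3 h3 <;> simp_all <;> omega

lemma lab_fold : ∀ (xs : List Int) (x : Int) (L : List Int) (rid : Int),
    ((x :: xs).zip xs).foldl lblStep (L, rid) = (L ++ labsAux rid x xs, finRid rid x xs) := by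
  intro xs
  induction xs with
  | nil => intro x L rid; simp [labsAux, finRid]
  | cons y ys ih =>
    intro x L rid
    have hz : (x :: y :: ys).zip (y :: ys) = (x, y) :: ((y :: ys).zip ys) := by
      simp [List.zip]
    rw [hz]
    simp only [List.foldl_cons]
    by_cases h1 : y - x = 1
    · have : lblStep (L, rid) (x, y) = (L ++ [rid], rid) := by simp [lblStep, h1]
      rw [this, ih y (L ++ [rid]) rid]
      simp [labsAux, finRid, h1]
    · have : lblStep (L, rid) (x, y) = (L ++ [rid + 1], rid + 1) := by simp [lblStep, h1]
      rw [this, ih y (L ++ [rid + 1]) (rid + 1)]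
      simp [labsAux, finRid, h1]

lemma labsAux_ge : ∀ (xs : List Int) (x rid m : Int), m ∈ labsAux rid x xs → rid ≤ m := by
  intro xs
  induction xs with
  | nil => intro x rid m h; simp [labsAux] at h
  | cons y ys ih =>
    intro x rid m h
    simp only [labsAux] at h
    split_ifs at h with h1
    · rcases List.mem_cons.mp h with h2 | h2
      · omega
      · exact ih y rid m h2
    · rcases List.mem_cons.mp h with h2 | h2
      · omega
      · have := ih y (rid + 1) m h2; omega

lemma count_head : ∀ (xs : List Int) (x rid : Int),
    (rid :: labsAux rid x xs).count rid = chainLen x xs + 1 := by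
  intro xs
  induction xs with
  | nil => intro x rid; simp [labsAux, chainLen]
  | cons y ys ih =>
    intro x rid
    simp only [labsAux, chainLen]
    by_cases h1 : y - x = 1
    · rw [if_pos h1, if_pos h1]
      have := ih y rid
      simp only [List.count_cons] at this ⊢
      simp_all
    · rw [if_neg h1, if_neg h1]
      have h0 : ∀ m ∈ (rid + 1) :: labsAux (rid + 1) y ys, m ≠ rid := by
        intro m hm
        rcases List.mem_cons.mp hm with h2 | h2
        · omega
        · have := labsAux_ge ys y (rid + 1) m h2; omega
      have : ((rid + 1) :: labsAux (rid + 1) y ys).count rid = 0 := by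
        rw [List.count_eq_zero]
        intro hmem; exact h0 rid hmem rfl
      simp [this]

lemma count_cons_ne (a b : Int) (l : List Int) (h : b ≠ a) : (a :: l).count b = l.count b := by
  simp [Ne.symm h]

lemma bf_main (k : Int) (C : Int → Int) : ∀ (xs : List Int) (x pre rid : Int) (acc : List Int),
    C rid = pre + 1 + (chainLen x xs : Int) →
    (∀ m, m ∈ labsAux rid x xs → m ≠ rid → C m = ((rid :: labsAux rid x xs).count m : Int)) →
    ((x :: xs).zip (rid :: labsAux rid x xs)).foldl
        (fun acc vr => if C vr.2 < k then acc ++ [vr.1] else acc) acc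
      = acc ++ gtail k pre x xs := by
  intro xs
  induction xs with
  | nil =>
    intro x pre rid acc hC1 _
    simp only [labsAux, chainLen, Int.natCast_zero, add_zero] at hC1 ⊢
    simp only [List.zip, List.zipWith, List.foldl_cons, List.foldl_nil, gtail, hC1]
    split_ifs <;> simp
  | cons y ys ih =>
    intro x pre rid acc hC1 hC2
    by_cases h1 : y - x = 1
    · have hl : labsAux rid x (y :: ys) = rid :: labsAux rid y ys := by simp [labsAux, h1]
      rw [hl]
      have hz : (x :: y :: ys).zip (rid :: rid :: labsAux rid y ys)
          = (x, rid) :: ((y :: ys).zip (rid :: labsAux rid y ys)) := by simp [List.zip]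
      rw [hz]
      simp only [List.foldl_cons]
      have hcx : (chainLen x (y :: ys) : Int) = (chainLen y ys : Int) + 1 := by
        simp [chainLen, h1]
      have step : (if C rid < k then acc ++ [x] else acc)
          = acc ++ (if pre + 1 + (chainLen x (y :: ys) : Int) < k then [x] else []) := by
        rw [hC1]; split_ifs <;> simp
      rw [ih y (pre + 1) rid (if C rid < k then acc ++ [x] else acc)
          (by rw [hC1, hcx]; ring)
          (by intro m hm hne
              have := hC2 m (by rw [hl]; exact List.mem_cons_of_mem _ hm) hne
              rw [this, hl, count_cons_ne rid m _ hne]),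
        step, gtail, if_pos h1]
      simp
    · have hl : labsAux rid x (y :: ys) = (rid + 1) :: labsAux (rid + 1) y ys := by
        simp [labsAux, h1]
      rw [hl]
      have hz : (x :: y :: ys).zip (rid :: (rid + 1) :: labsAux (rid + 1) y ys)
          = (x, rid) :: ((y :: ys).zip ((rid + 1) :: labsAux (rid + 1) y ys)) := by
        simp [List.zip]
      rw [hz]
      simp only [List.foldl_cons]
      have hcx : (chainLen x (y :: ys) : Int) = 0 := by simp [chainLen, h1]
      have step : (if C rid < k then acc ++ [x] else acc)
          = acc ++ (if pre + 1 + (chainLen x (y :: ys) : Int) < k then [x] else []) := by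
        rw [hC1, hcx]; split_ifs <;> simp_all
      have hC1' : C (rid + 1) = 0 + 1 + (chainLen y ys : Int) := by
        have := hC2 (rid + 1) (by rw [hl]; exact List.mem_cons_self) (by omega)
        rw [hl] at this
        rw [this]
        have hne : (rid + 1 : Int) ≠ rid := by omega
        rw [count_cons_ne rid (rid + 1) _ hne, count_head]
        push_cast; ring
      have hC2' : ∀ m, m ∈ labsAux (rid + 1) y ys → m ≠ rid + 1 →
          C m = (((rid + 1) :: labsAux (rid + 1) y ys).count m : Int) := by
        intro m hm hne
        have hmr : m ≠ rid := by have := labsAux_ge ys y (rid + 1) m hm; omega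
        have := hC2 m (by rw [hl]; exact List.mem_cons_of_mem _ hm) hmr
        rw [this, hl, count_cons_ne rid m _ hmr]
      rw [ih y 0 (rid + 1) (if C rid < k then acc ++ [x] else acc) hC1' hC2',
        step, gtail, if_neg h1]
      simp

-- ===== VERDICT (by name: the statement is the Claim_ definition above) =====
theorem get_gap_list_spec : Claim_equal_get_gap_list := by
  intro xs k _
  unfold Spec_get_gap_list get_gap_list get_gap_list_alt
  by_cases hk : k > 0
  · by_cases hxs : xs = []
    · simp [hxs, hk]
    · rw [if_pos hk, if_pos (show ¬xs = [] from hxs),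
        if_neg (show ¬(k ≤ 0 ∨ xs = []) from fun h => h.elim (by omega) hxs)]
      have hs : PySem.List.sorted xs (fun x => x) false ≠ [] := by
        simpa [PySem.List.sorted_eq_nil_iff] using hxs
      obtain ⟨x, s', hsx⟩ := List.exists_cons_of_ne_nil hs
      simp only [hsx]
      -- A side
      rw [PySem.List.enumerate_cons]
      simp only [List.foldl_cons]
      have h0 : (PySem.List.pyGet? (x :: s') 0).getD 0 = x := by
        simp [PySem.List.pyGet?, PySem.List.pyIdx?]
      rw [h0]
      have hA0 : ggStepA k (1, [], [], x) (0, x) = (1, [x], [], x) := by simp [ggStepA]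
      rw [hA0]
      simp only [zero_add]
      have hA := ggA_main k s' x [] [] 1 (by omega)
      simp only [List.length_nil, Int.natCast_zero, zero_add, List.nil_append] at hA
      rw [hA]
      -- B side
      have hsl : PySem.List.slice (x :: s') (some 1) none = s' := by
        rw [PySem.List.slice_from_one]; rfl
      rw [hsl, lab_fold s' x [0] 0]
      have hlabels : [0] ++ labsAux 0 x s' = (0 : Int) :: labsAux 0 x s' := by simp
      rw [hlabels]
      rw [PySem.Dict.foldl_insert_getD_add_one_eq_counter]
      have hmap : (fun (acc : List Int) (vr : Int × Int) =>
            if (PySem.Dict.counter ((0 : Int) :: labsAux 0 x s')).getD vr.2 0 < k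
            then acc ++ [vr.1] else acc)
          = (fun acc vr =>
            if (fun m => ((((0 : Int) :: labsAux 0 x s').count m : Int))) vr.2 < k
            then acc ++ [vr.1] else acc) := by
        funext acc vr
        rw [PySem.Dict.getD_counter]
      rw [hmap, bf_main k (fun m => ((((0 : Int) :: labsAux 0 x s').count m : Int))) s' x 0 0 []
        (by simp only [count_head]; push_cast; ring)
        (by intro m _ _; rfl)]
      rw [gspec_eq_gtail]
      simp
  · simp [hk, show k ≤ 0 by omega]
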